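-- pv_equiv track=rewrite | github.com/BjrnJhsn/git-outlier | outlier.py | get_diagram_output
-- ===== SOURCE A (Python) =====
-- def get_diagram_output(
--     points_to_plot, outliers_to_plot, max_xval, max_yval, x_axis, y_axis
-- ):
--     output = ""
--     output = output + x_axis + "\n"
--     for y_val in range(max_yval, -1, -1):
--         output = output + "|"
--         if points_to_plot[y_val] or outliers_to_plot[y_val] is not None:
--             for x_val in range(0, max_xval + 1, 1):
--                 if points_to_plot[y_val] is not None and x_val in points_to_plot[y_val]:
--                     output = output + "X"
--                 elif (
--                     outliers_to_plot[y_val] is not None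
--                     and x_val in outliers_to_plot[y_val]
--                 ):
--                     output = output + "O"
--                 else:
--                     output = output + " "
--         output = output + "\n"
--     for x_val in range(0, max_xval + 1, 1):
--         output = output + "-"
--     output = output + y_axis
--     return output
-- ===== SOURCE B (Python) =====
-- def get_diagram_output(
--     points_to_plot, outliers_to_plot, max_xval, max_yval, x_axis, y_axis
-- ):
--     width = max_xval + 1
--     lines = [x_axis + "\n"]
--     for y in range(max_yval, -1, -1):
--         p = points_to_plot[y]
--         o = outliers_to_plot[y]
--         if p or o is not None:
--             row = [" "] * width
--             for v in (o if o is not None else []):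
--                 if 0 <= v <= max_xval:
--                     row[v] = "O"
--             for v in (p if p is not None else []):
--                 if 0 <= v <= max_xval:
--                     row[v] = "X"
--             lines.append("|" + "".join(row) + "\n")
--         else:
--             lines.append("|\n")
--     lines.append("-" * width + y_axis)
--     return "".join(lines)
-- ===== Notes on version B (the rewrite author's own statement) =====
-- stated objective: faster
-- what changed: B replaces A's per-cell membership scan (for every x in 0..max_xval test 'x in points[y]' / 'x in outliers[y]') by direct placement: each active row starts as a blank char list, 'O' then 'X' are written at the listed in-range coordinates (X overwrites O), and the collected lines are joined once; intended as faster (measured 15.35x at the largest size both programs finished; on huge outputs both are bounded by the output size).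
-- outside the precondition, e.g. on get_diagram_output([[0]], [], 0, 0, 'x', 'y'): A returns 'x\n|X\n-y', B raises IndexError
import Mathlib
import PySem

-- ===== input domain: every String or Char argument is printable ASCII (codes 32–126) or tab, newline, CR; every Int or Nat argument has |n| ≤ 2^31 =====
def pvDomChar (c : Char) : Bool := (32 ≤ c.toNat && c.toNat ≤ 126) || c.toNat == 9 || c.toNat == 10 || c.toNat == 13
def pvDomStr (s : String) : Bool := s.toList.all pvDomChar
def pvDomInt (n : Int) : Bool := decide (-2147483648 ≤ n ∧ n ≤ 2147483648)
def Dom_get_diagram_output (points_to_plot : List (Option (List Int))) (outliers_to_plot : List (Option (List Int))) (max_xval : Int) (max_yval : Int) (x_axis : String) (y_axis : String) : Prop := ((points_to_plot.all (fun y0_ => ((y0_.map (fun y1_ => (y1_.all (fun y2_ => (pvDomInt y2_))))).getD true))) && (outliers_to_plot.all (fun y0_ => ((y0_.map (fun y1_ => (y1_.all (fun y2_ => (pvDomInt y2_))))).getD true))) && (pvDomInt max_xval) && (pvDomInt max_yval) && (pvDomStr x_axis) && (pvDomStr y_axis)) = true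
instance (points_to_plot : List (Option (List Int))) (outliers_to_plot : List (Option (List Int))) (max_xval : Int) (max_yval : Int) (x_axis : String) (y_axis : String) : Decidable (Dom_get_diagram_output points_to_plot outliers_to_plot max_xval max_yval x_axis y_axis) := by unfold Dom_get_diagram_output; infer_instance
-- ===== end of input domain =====

-- B builds each active row by placing 'O' then 'X' at the listed coordinates into a preallocated
-- blank row and joins the collected lines, instead of A's per-cell membership scan
-- (objective: intended as faster; a timing run measured 15.35x at the largest size both finished).

-- ===== PORT A =====
-- A indexes points_to_plot[y]/outliers_to_plot[y] for y in range(max_yval,-1,-1); Pre_ excludes the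
-- out-of-range indexings, so here the lookup is written with a default that Pre_ makes unreachable.
def get_diagram_output (points_to_plot : List (Option (List Int))) (outliers_to_plot : List (Option (List Int))) (max_xval : Int) (max_yval : Int) (x_axis : String) (y_axis : String) : String :=
  let output : String := "" ++ x_axis ++ "\n"
  let output := (PySem.List.pyRange max_yval (-1) (-1)).foldl (fun output y_val =>
    let output := output ++ "|"
    let p := (PySem.List.pyGet? points_to_plot y_val).getD none
    let o := (PySem.List.pyGet? outliers_to_plot y_val).getD none
    -- 'if points_to_plot[y_val] or outliers_to_plot[y_val] is not None:' (truthiness of the list)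
    let output := if p.getD [] ≠ [] ∨ o ≠ none then
        (PySem.List.pyRange 0 (max_xval + 1) 1).foldl (fun output x_val =>
          if p ≠ none ∧ (p.getD []).contains x_val then output ++ "X"
          else if o ≠ none ∧ (o.getD []).contains x_val then output ++ "O"
          else output ++ " ") output
      else output
    output ++ "\n") output
  let output := (PySem.List.pyRange 0 (max_xval + 1) 1).foldl (fun output _ => output ++ "-") output
  output ++ y_axis

-- ===== PORT B =====
-- ' '*(width) and '-'*width with a possibly negative width: Python repetition with n ≤ 0 is empty,
-- which is exactly (max_xval+1).toNat-fold replicate.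
def get_diagram_output_alt (points_to_plot : List (Option (List Int))) (outliers_to_plot : List (Option (List Int))) (max_xval : Int) (max_yval : Int) (x_axis : String) (y_axis : String) : String :=
  let width := max_xval + 1
  let lines : List String := [x_axis ++ "\n"]
  let lines := (PySem.List.pyRange max_yval (-1) (-1)).foldl (fun lines y =>
    let p := (PySem.List.pyGet? points_to_plot y).getD none
    let o := (PySem.List.pyGet? outliers_to_plot y).getD none
    if p.getD [] ≠ [] ∨ o ≠ none then
      let row := List.replicate width.toNat ' '
      let row := (o.getD []).foldl (fun r v => if 0 ≤ v ∧ v ≤ max_xval then r.set v.toNat 'O' else r) row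
      let row := (p.getD []).foldl (fun r v => if 0 ≤ v ∧ v ≤ max_xval then r.set v.toNat 'X' else r) row
      lines ++ ["|" ++ String.ofList row ++ "\n"]
    else lines ++ ["|\n"]) lines
  let lines := lines ++ [String.ofList (List.replicate width.toNat '-') ++ y_axis]
  PySem.Str.join "" lines

-- ===== PRECONDITION & SPEC =====
-- Pre_ excludes inputs where some row index y ∈ [0, max_yval] is out of range for either list: there
-- Python A raises IndexError (except in the corner where short-circuiting never touches the short
-- outliers list although A returns — excluded all the same, see the cite).
def Pre_get_diagram_output (points_to_plot : List (Option (List Int))) (outliers_to_plot : List (Option (List Int))) (max_xval : Int) (max_yval : Int) (x_axis : String) (y_axis : String) : Prop :=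
  max_yval < (points_to_plot.length : Int) ∧ max_yval < (outliers_to_plot.length : Int)
instance (points_to_plot : List (Option (List Int))) (outliers_to_plot : List (Option (List Int))) (max_xval : Int) (max_yval : Int) (x_axis : String) (y_axis : String) : Decidable (Pre_get_diagram_output points_to_plot outliers_to_plot max_xval max_yval x_axis y_axis) := by unfold Pre_get_diagram_output; infer_instance
def pvWitness_get_diagram_output : List (Option (List Int)) × List (Option (List Int)) × Int × Int × String × String :=
  ([some [0, 2], none], [none, some [1]], 2, 1, "x axis", "y axis")
def Spec_get_diagram_output (points_to_plot : List (Option (List Int))) (outliers_to_plot : List (Option (List Int))) (max_xval : Int) (max_yval : Int) (x_axis : String) (y_axis : String) (out : String) : Prop := out = get_diagram_output_alt points_to_plot outliers_to_plot max_xval max_yval x_axis y_axis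
instance (points_to_plot : List (Option (List Int))) (outliers_to_plot : List (Option (List Int))) (max_xval : Int) (max_yval : Int) (x_axis : String) (y_axis : String) (out : String) : Decidable (Spec_get_diagram_output points_to_plot outliers_to_plot max_xval max_yval x_axis y_axis out) := by unfold Spec_get_diagram_output; infer_instance

-- ===== CLAIM (what is proved, stated in full; the proofs are below) =====
def Claim_equal_get_diagram_output : Prop := ∀ (points_to_plot : List (Option (List Int))) (outliers_to_plot : List (Option (List Int))) (max_xval : Int) (max_yval : Int) (x_axis : String) (y_axis : String), Dom_get_diagram_output points_to_plot outliers_to_plot max_xval max_yval x_axis y_axis → Pre_get_diagram_output points_to_plot outliers_to_plot max_xval max_yval x_axis y_axis → Spec_get_diagram_output points_to_plot outliers_to_plot max_xval max_yval x_axis y_axis (get_diagram_output points_to_plot outliers_to_plot max_xval max_yval x_axis y_axis)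

-- ===== LEMMAS AND PROOFS =====

-- the character A emits at cell x of the row described by p (points) and o (outliers)
def pvChA (p o : Option (List Int)) (x : Int) : Char :=
  if p ≠ none ∧ (p.getD []).contains x then 'X'
  else if o ≠ none ∧ (o.getD []).contains x then 'O' else ' '

theorem pvChA_eq (p o : Option (List Int)) (x : Int) :
    pvChA p o x = if (p.getD []).contains x then 'X'
      else if (o.getD []).contains x then 'O' else ' ' := by
  cases p <;> cases o <;> simp [pvChA]

-- the line A emits for row y
def pvGA (pts outs : List (Option (List Int))) (mx y : Int) : String :=
  "|" ++ (if ((PySem.List.pyGet? pts y).getD none).getD [] ≠ [] ∨ (PySem.List.pyGet? outs y).getD none ≠ none then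
    String.ofList ((PySem.List.pyRange 0 (mx + 1) 1).map
      (pvChA ((PySem.List.pyGet? pts y).getD none) ((PySem.List.pyGet? outs y).getD none))) else "") ++ "\n"

-- the line B emits for row y
def pvGB (pts outs : List (Option (List Int))) (mx y : Int) : String :=
  if ((PySem.List.pyGet? pts y).getD none).getD [] ≠ [] ∨ (PySem.List.pyGet? outs y).getD none ≠ none then
    "|" ++ String.ofList
      ((((PySem.List.pyGet? pts y).getD none).getD []).foldl
        (fun r v => if 0 ≤ v ∧ v ≤ mx then r.set v.toNat 'X' else r)
        ((((PySem.List.pyGet? outs y).getD none).getD []).foldl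
          (fun r v => if 0 ≤ v ∧ v ≤ mx then r.set v.toNat 'O' else r)
          (List.replicate (mx + 1).toNat ' '))) ++ "\n"
  else "|\n"

theorem pv_join_empty (ls : List (List Char)) : PySem.Chars.join [] ls = ls.flatten := by
  induction ls with
  | nil => simp [PySem.Chars.join, List.intercalate]
  | cons a t ih =>
    cases t with
    | nil => simp [PySem.Chars.join_singleton]
    | cons b u => rw [PySem.Chars.join_cons_cons]; simp_all

theorem pv_foldl_append_str {α : Type} (g : α → String) (l : List α) (s : String) :
    l.foldl (fun acc y => acc ++ g y) s
      = s ++ String.ofList ((l.map (fun y => (g y).toList)).flatten) := by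
  induction l generalizing s with
  | nil => apply String.toList_inj.mp; simp
  | cons a t ih => rw [List.foldl_cons, ih]; apply String.toList_inj.mp; simp

theorem pv_flatten_singletons {α β : Type} (f : α → β) (l : List α) :
    (l.map (fun x => [f x])).flatten = l.map f := by
  induction l with
  | nil => rfl
  | cons a t ih => simp [ih]

theorem pv_place_length (c : Char) (m : Int) (coords : List Int) (row : List Char) :
    (coords.foldl (fun r v => if 0 ≤ v ∧ v ≤ m then r.set v.toNat c else r) row).length
      = row.length := by
  induction coords generalizing row with
  | nil => rfl
  | cons v vs ih => simp only [List.foldl_cons]; rw [ih]; split <;> simp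

theorem pv_place_getElem? (c : Char) (m : Int) (coords : List Int) (row : List Char) (i : Nat)
    (hi : i < row.length) (him : (i : Int) ≤ m) :
    (coords.foldl (fun r v => if 0 ≤ v ∧ v ≤ m then r.set v.toNat c else r) row)[i]?
      = if coords.contains (i : Int) then some c else row[i]? := by
  induction coords generalizing row with
  | nil => simp
  | cons v vs ih =>
    simp only [List.foldl_cons]
    rw [ih]
    · by_cases hv : v = (i : Int)
      · subst hv
        have : (0 ≤ (i:Int) ∧ (i:Int) ≤ m) := ⟨by positivity, him⟩
        simp [this, List.getElem?_set, hi]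
      · have h1 : (v :: vs).contains (i : Int) = vs.contains (i : Int) := by
          have hne : ¬ ((i : Int) = v) := fun h => hv h.symm
          simp [List.contains_cons, hne]
        rw [h1]
        split
        · rfl
        · split
          · rename_i hc
            have : v.toNat ≠ i := by omega
            simp [List.getElem?_set, this]
          · rfl
    · split <;> simpa using hi

theorem pv_row_eq (p o : Option (List Int)) (mx : Int) :
    (PySem.List.pyRange 0 (mx + 1) 1).map (pvChA p o)
      = (p.getD []).foldl (fun r v => if 0 ≤ v ∧ v ≤ mx then r.set v.toNat 'X' else r)
          ((o.getD []).foldl (fun r v => if 0 ≤ v ∧ v ≤ mx then r.set v.toNat 'O' else r)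
            (List.replicate (mx + 1).toNat ' ')) := by
  have hlenO : ((o.getD []).foldl (fun r v => if 0 ≤ v ∧ v ≤ mx then r.set v.toNat 'O' else r)
      (List.replicate (mx + 1).toNat ' ')).length = (mx + 1).toNat := by
    rw [pv_place_length]; simp
  apply List.ext_getElem?
  intro i
  by_cases hi : i < (mx + 1).toNat
  · have hiI : (i : Int) ≤ mx := by omega
    rw [pv_place_getElem? _ _ _ _ _ (by rw [hlenO]; exact hi) hiI,
        pv_place_getElem? _ _ _ _ _ (by simpa using hi) hiI]
    rw [PySem.List.pyRange_one]
    have hi' : i < (mx + 1 - 0).toNat := by omega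
    simp only [List.map_map, List.getElem?_map, List.getElem?_range, hi', if_pos,
      List.getElem?_replicate]
    simp only [Option.map_some, Function.comp_apply, zero_add, pvChA_eq, hi]
    split <;> simp_all <;> split <;> simp_all
  · have h1 : ((PySem.List.pyRange 0 (mx + 1) 1).map (pvChA p o)).length = (mx + 1).toNat := by
      rw [List.length_map, PySem.List.length_pyRange_one]; omega
    have h2 : ((p.getD []).foldl (fun r v => if 0 ≤ v ∧ v ≤ mx then r.set v.toNat 'X' else r)
        ((o.getD []).foldl (fun r v => if 0 ≤ v ∧ v ≤ mx then r.set v.toNat 'O' else r)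
          (List.replicate (mx + 1).toNat ' '))).length = (mx + 1).toNat := by
      rw [pv_place_length, hlenO]
    rw [List.getElem?_eq_none (by omega), List.getElem?_eq_none (by omega)]

theorem pv_gA_eq_gB (pts outs : List (Option (List Int))) (mx y : Int) :
    pvGA pts outs mx y = pvGB pts outs mx y := by
  unfold pvGA pvGB
  split
  · apply String.toList_inj.mp
    simp [pv_row_eq]
  · apply String.toList_inj.mp
    simp

theorem pv_stepA_eq (pts outs : List (Option (List Int))) (mx : Int) :
    (fun (output : String) (y_val : Int) =>
      let output := output ++ "|"
      let p := (PySem.List.pyGet? pts y_val).getD none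
      let o := (PySem.List.pyGet? outs y_val).getD none
      let output := if p.getD [] ≠ [] ∨ o ≠ none then
          (PySem.List.pyRange 0 (mx + 1) 1).foldl (fun output x_val =>
            if p ≠ none ∧ (p.getD []).contains x_val then output ++ "X"
            else if o ≠ none ∧ (o.getD []).contains x_val then output ++ "O"
            else output ++ " ") output
        else output
      output ++ "\n")
    = fun output y => output ++ pvGA pts outs mx y := by
  funext output y
  show (if _ ∨ _ then _ else _) ++ "\n" = _
  have hin : ∀ (p o : Option (List Int)) (s : String),
      (PySem.List.pyRange 0 (mx + 1) 1).foldl (fun out x =>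
        if p ≠ none ∧ (p.getD []).contains x then out ++ "X"
        else if o ≠ none ∧ (o.getD []).contains x then out ++ "O"
        else out ++ " ") s
      = s ++ String.ofList ((PySem.List.pyRange 0 (mx + 1) 1).map (pvChA p o)) := by
    intro p o s
    have hf : (fun (out : String) (x : Int) =>
        if p ≠ none ∧ (p.getD []).contains x then out ++ "X"
        else if o ≠ none ∧ (o.getD []).contains x then out ++ "O"
        else out ++ " ") = fun out x => out ++ String.ofList [pvChA p o x] := by
      funext out x
      unfold pvChA
      split_ifs <;> (apply String.toList_inj.mp; simp)
    rw [hf, pv_foldl_append_str]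
    congr 2
    simp only [String.toList_ofList]
    exact pv_flatten_singletons _ _
  unfold pvGA
  split
  · rw [hin]
    apply String.toList_inj.mp; simp
  · apply String.toList_inj.mp; simp

theorem pv_stepB_eq (pts outs : List (Option (List Int))) (mx : Int) :
    (fun (lines : List String) (y : Int) =>
      let p := (PySem.List.pyGet? pts y).getD none
      let o := (PySem.List.pyGet? outs y).getD none
      if p.getD [] ≠ [] ∨ o ≠ none then
        let row := List.replicate (mx + 1).toNat ' '
        let row := (o.getD []).foldl (fun r v => if 0 ≤ v ∧ v ≤ mx then r.set v.toNat 'O' else r) row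
        let row := (p.getD []).foldl (fun r v => if 0 ≤ v ∧ v ≤ mx then r.set v.toNat 'X' else r) row
        lines ++ ["|" ++ String.ofList row ++ "\n"]
      else lines ++ ["|\n"])
    = fun lines y => lines ++ [pvGB pts outs mx y] := by
  funext lines y
  show (if _ ∨ _ then _ else _) = _
  unfold pvGB
  split <;> rfl

theorem pv_main (pts outs : List (Option (List Int))) (mx my : Int) (xa ya : String) :
    get_diagram_output pts outs mx my xa ya = get_diagram_output_alt pts outs mx my xa ya := by
  simp only [get_diagram_output, get_diagram_output_alt]
  rw [pv_stepA_eq, pv_stepB_eq, pv_foldl_append_str, pv_foldl_append_str,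
    PySem.List.foldl_append_singleton_eq_map]
  apply String.toList_inj.mp
  simp only [PySem.Str.toList_join, pv_join_empty, List.map_append, List.map_cons, List.map_nil,
    List.flatten_append, List.flatten_cons, List.flatten_nil, String.toList_append,
    String.toList_ofList, List.append_assoc, List.append_nil]
  have hdash : ((PySem.List.pyRange 0 (mx + 1) 1).map (fun _ => ("-" : String).toList)).flatten
      = List.replicate (mx + 1).toNat '-' := by
    rw [show (fun (_ : Int) => ("-" : String).toList) = fun y => [(fun _ => '-') y] from by
      funext y; rfl]
    rw [pv_flatten_singletons]
    rw [List.map_const', PySem.List.length_pyRange_one]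
    norm_num
  rw [hdash]
  rw [show ("".toList : List Char) = [] from rfl, show ("\n".toList : List Char) = ['\n'] from rfl]
  rw [pv_join_empty]
  simp [pv_gA_eq_gB, Function.comp_def]

-- ===== VERDICT (by name: the statement is the Claim_ definition above) =====
theorem get_diagram_output_spec : Claim_equal_get_diagram_output := by
  intro pts outs mx my xa ya _ _
  unfold Spec_get_diagram_output
  exact pv_main pts outs mx my xa ya
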